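-- pv_equiv track=rewrite | github.com/FTDfangge/leetcode | competetion/leetcode_cup/CUP_2.py | adventureCamp
-- ===== SOURCE A (Python) =====
-- from typing import List
--
-- def adventureCamp(expeditions: List[str]) -> int:
--     known = dict()
--     inits = expeditions[0].split('->')
--     for init in inits:
--         known[init] = 1
--     most_trip = -1
--     most_found = 0
--     for trip in range(1, expeditions.__len__()):
--         new_get = expeditions[trip].split('->')
--         this_found = 0
--         for get in new_get:
--             if get:
--                 try:
--                     known[get] += 1
--                 except KeyError:
--                     this_found += 1
--                     known[get] = 1
--         if this_found > most_found:
--             most_trip = trip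
--             most_found = this_found
--     return most_trip
-- ===== SOURCE B (Python) =====
-- from typing import List
--
-- def adventureCamp(expeditions: List[str]) -> int:
--     # Pass 1: map each place to the index of the trip where it is first seen.
--     first_seen = {}
--     for place in expeditions[0].split('->'):
--         first_seen[place] = 0
--     for t, trip in enumerate(expeditions[1:], 1):
--         for place in trip.split('->'):
--             if place and place not in first_seen:
--                 first_seen[place] = t
--     # Pass 2: histogram of first-seen trip indices, then pick the earliest best trip.
--     counts = [0] * len(expeditions)
--     for v in first_seen.values():
--         counts[v] += 1
--     most_trip, most_found = -1, 0
--     for t in range(1, len(expeditions)):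
--         if counts[t] > most_found:
--             most_trip, most_found = t, counts[t]
--     return most_trip
-- ===== Notes on version B (the rewrite author's own statement) =====
-- stated objective: alternative
-- what changed: Instead of interleaving per-trip counting with best-tracking in one loop over a counts dict, B first builds a first_seen dict mapping each place to the trip index where it first appears, then tallies a per-trip histogram of first_seen values and scans trips 1..n-1 for the earliest strictly-best count.
import Mathlib
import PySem

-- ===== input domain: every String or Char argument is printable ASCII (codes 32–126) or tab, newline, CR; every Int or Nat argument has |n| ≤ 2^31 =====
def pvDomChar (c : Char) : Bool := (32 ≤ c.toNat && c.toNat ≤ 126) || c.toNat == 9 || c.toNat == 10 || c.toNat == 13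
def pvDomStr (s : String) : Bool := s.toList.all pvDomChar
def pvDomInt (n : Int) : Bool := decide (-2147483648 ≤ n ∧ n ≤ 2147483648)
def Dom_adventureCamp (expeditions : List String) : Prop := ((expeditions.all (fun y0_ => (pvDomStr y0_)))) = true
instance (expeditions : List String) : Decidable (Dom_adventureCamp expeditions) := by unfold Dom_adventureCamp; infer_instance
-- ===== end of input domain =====

-- B rebuilds the same answer by a different decomposition: one pass records each place's first-seen
-- trip index, a histogram pass counts first discoveries per trip, and a final scan picks the
-- earliest trip with a strictly best count (alternative decomposition, same cost).

-- ===== PORT A =====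
def adventureCamp (expeditions : List String) : Int :=
  match expeditions with
  | [] => 0  -- Python raises IndexError on expeditions[0]; excluded by Pre_
  | e0 :: _ =>
    let known0 : PySem.Dict String Int :=
      (((PySem.Str.split? e0 "->").getD [])).foldl (fun k init => k.insert init 1) PySem.Dict.empty
    let st := (PySem.List.pyRange 1 (PySem.List.len expeditions) 1).foldl
      (fun (st : PySem.Dict String Int × Int × Int) trip =>
        let new_get := ((PySem.Str.split? (PySem.List.pyGetD expeditions trip "") "->").getD [])
        let q := new_get.foldl
          (fun (p : PySem.Dict String Int × Int) g =>
            if g ≠ "" then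
              match p.1.get? g with
              | some v => (p.1.insert g (v + 1), p.2)
              | none   => (p.1.insert g 1, p.2 + 1)
            else p)
          (st.1, (0 : Int))
        if q.2 > st.2.2 then (q.1, trip, q.2) else (q.1, st.2.1, st.2.2))
      (known0, (-1 : Int), (0 : Int))
    st.2.1

-- ===== PORT B =====
def adventureCamp_alt (expeditions : List String) : Int :=
  match expeditions with
  | [] => 0  -- Python raises IndexError on expeditions[0]; excluded by Pre_
  | e0 :: _ =>
    let fs0 : PySem.Dict String Int :=
      (((PySem.Str.split? e0 "->").getD [])).foldl (fun d place => d.insert place 0) PySem.Dict.empty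
    let fs := (PySem.List.enumerate (PySem.List.slice expeditions (some 1) none) 1).foldl
      (fun (d : PySem.Dict String Int) tp =>
        (((PySem.Str.split? tp.2 "->").getD [])).foldl
          (fun (d : PySem.Dict String Int) place =>
            if place ≠ "" && !d.contains place then d.insert place tp.1 else d) d)
      fs0
    let counts : List Int := fs.values.foldl
      (fun cs v => PySem.List.pySetD cs v (PySem.List.pyGetD cs v 0 + 1))
      (List.replicate expeditions.length (0 : Int))
    let st := (PySem.List.pyRange 1 (PySem.List.len expeditions) 1).foldl
      (fun (st : Int × Int) t =>
        if PySem.List.pyGetD counts t 0 > st.2 then (t, PySem.List.pyGetD counts t 0) else st)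
      ((-1 : Int), (0 : Int))
    st.1

-- ===== PRECONDITION & SPEC =====
-- Pre_ excludes only the empty list, on which Python's expeditions[0] raises IndexError.
def Pre_adventureCamp (expeditions : List String) : Prop := expeditions ≠ []
instance (expeditions : List String) : Decidable (Pre_adventureCamp expeditions) := by unfold Pre_adventureCamp; infer_instance
def pvWitness_adventureCamp : List String := ["leet->code", "leet->code->ing"]
def Spec_adventureCamp (expeditions : List String) (out : Int) : Prop := out = adventureCamp_alt expeditions
instance (expeditions : List String) (out : Int) : Decidable (Spec_adventureCamp expeditions out) := by unfold Spec_adventureCamp; infer_instance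

-- ===== CLAIM (what is proved, stated in full; the proofs are below) =====
def Claim_equal_adventureCamp : Prop := ∀ (expeditions : List String), Dom_adventureCamp expeditions → Pre_adventureCamp expeditions → Spec_adventureCamp expeditions (adventureCamp expeditions)

-- ===== LEMMAS AND PROOFS =====

-- proof-side names for the loop bodies of the two ports
def pvSegs (s : String) : List String := ((PySem.Str.split? s "->").getD [])

def pvFA (p : PySem.Dict String Int × Int) (g : String) : PySem.Dict String Int × Int :=
  if g ≠ "" then
    match p.1.get? g with
    | some v => (p.1.insert g (v + 1), p.2)
    | none   => (p.1.insert g 1, p.2 + 1)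
  else p

def pvStepA (st : PySem.Dict String Int × Int × Int) (p : Int × String) :
    PySem.Dict String Int × Int × Int :=
  let q := (pvSegs p.2).foldl pvFA (st.1, (0 : Int))
  if q.2 > st.2.2 then (q.1, p.1, q.2) else (q.1, st.2.1, st.2.2)

def pvFB (t : Int) (d : PySem.Dict String Int) (g : String) : PySem.Dict String Int :=
  if g ≠ "" && !d.contains g then d.insert g t else d

def pvStepB (d : PySem.Dict String Int) (p : Int × String) : PySem.Dict String Int :=
  (pvSegs p.2).foldl (pvFB p.1) d

def pvCnt (d : PySem.Dict String Int) (t : Int) : Int := (d.values.count t : Int)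

def pvScan (c : Int → Int) (st : Int × Int) (t : Int) : Int × Int :=
  if c t > st.2 then (t, c t) else st

theorem pv_foldl_congr {α β : Type} (l : List α) (f g : β → α → β) (init : β)
    (h : ∀ acc, ∀ x ∈ l, f acc x = g acc x) : l.foldl f init = l.foldl g init := by
  induction l generalizing init with
  | nil => rfl
  | cons x xs ih =>
    simp only [List.foldl_cons]
    rw [h init x (by simp)]
    exact ih _ (fun acc y hy => h acc y (by simp [hy]))

theorem pv_foldA_enum {σ : Type} (F : σ → Int → String → σ) :
    ∀ (rest full : List String) (a : Int) (st : σ), 0 ≤ a → full.drop a.toNat = rest →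
      (PySem.List.pyRange a (full.length : Int) 1).foldl
          (fun st j => F st j (PySem.List.pyGetD full j "")) st
        = (PySem.List.enumerate rest a).foldl (fun st p => F st p.1 p.2) st := by
  intro rest
  induction rest with
  | nil =>
    intro full a st ha hdrop
    have hlen : full.length ≤ a.toNat := by
      simpa [List.drop_eq_nil_iff] using hdrop
    rw [PySem.List.pyRange_one_eq_nil (by omega), PySem.List.enumerate_nil]
    rfl
  | cons x xs ih =>
    intro full a st ha hdrop
    have hlt : a.toNat < full.length := by
      by_contra hc
      rw [List.drop_eq_nil_of_le (by omega)] at hdrop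
      exact List.cons_ne_nil x xs hdrop.symm
    rw [PySem.List.pyRange_one_cons (by omega), PySem.List.enumerate_cons]
    simp only [List.foldl_cons]
    have hx : PySem.List.pyGetD full a "" = x := by
      rw [PySem.List.pyGetD_eq_getElem full "" ha (by omega)]
      have h0 : (0 : Nat) < (full.drop a.toNat).length := by
        rw [hdrop]; simp
      have := List.getElem_drop (xs := full) (i := a.toNat) (j := 0) (h := h0)
      simp only [hdrop] at this ⊢
      simpa using this.symm
    rw [hx]
    have hdrop' : full.drop (a + 1).toNat = xs := by
      have h1 : (a + 1).toNat = a.toNat + 1 := by omega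
      rw [h1, ← List.drop_drop, hdrop]
      rfl
    exact ih full (a + 1) (F st a x) (by omega) hdrop'

theorem pv_trip_lemma (t : Int) (gs : List String) :
    ∀ (k d : PySem.Dict String Int) (tf : Int),
      (∀ g, k.contains g = d.contains g) → d.keys.Nodup →
      ∃ m : Nat,
        (gs.foldl pvFA (k, tf)).2 = tf + m ∧
        (gs.foldl (pvFB t) d).values = d.values ++ List.replicate m t ∧
        (∀ g, (gs.foldl pvFA (k, tf)).1.contains g = (gs.foldl (pvFB t) d).contains g) ∧
        (gs.foldl (pvFB t) d).keys.Nodup := by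
  induction gs with
  | nil =>
    intro k d tf hkd hnd
    exact ⟨0, by simp, by simp, hkd, hnd⟩
  | cons g gs ih =>
    intro k d tf hkd hnd
    simp only [List.foldl_cons]
    by_cases hg : g = ""
    · subst hg
      have hA : pvFA (k, tf) "" = (k, tf) := by simp [pvFA]
      have hB : pvFB t d "" = d := by simp [pvFB]
      rw [hA, hB]
      exact ih k d tf hkd hnd
    · cases hdc : d.contains g with
      | true =>
        have hkc : k.contains g = true := by rw [hkd g, hdc]
        obtain ⟨v, hv⟩ : ∃ v, k.get? g = some v := by
          have := PySem.Dict.contains_eq_isSome_get? k g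
          rw [hkc] at this
          exact Option.isSome_iff_exists.mp this.symm
        have hA : pvFA (k, tf) g = (k.insert g (v + 1), tf) := by
          simp [pvFA, hg, hv]
        have hB : pvFB t d g = d := by
          simp [pvFB, hdc]
        rw [hA, hB]
        refine ih _ _ _ (fun x => ?_) hnd
        rw [PySem.Dict.contains_insert]
        cases hx : (x == g) with
        | true =>
          have : x = g := by simpa using hx
          subst this
          simp [hkd x, hdc]
        | false => simp [hkd x]
      | false =>
        have hkc : k.contains g = false := by rw [hkd g, hdc]
        have hget : k.get? g = none := (PySem.Dict.get?_eq_none_iff_contains k g).mpr hkc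
        have hA : pvFA (k, tf) g = (k.insert g 1, tf + 1) := by
          simp [pvFA, hg, hget]
        have hB : pvFB t d g = d.insert g t := by
          simp [pvFB, hg, hdc]
        rw [hA, hB]
        obtain ⟨m, hm1, hm2, hm3, hm4⟩ := ih (k.insert g 1) (d.insert g t) (tf + 1)
          (fun x => by
            rw [PySem.Dict.contains_insert, PySem.Dict.contains_insert]
            cases hx : (x == g) with
            | true => simp
            | false => simp [hkd x])
          (PySem.Dict.nodup_keys_insert d g t hnd)
        refine ⟨m + 1, by rw [hm1]; push_cast; ring, ?_, hm3, hm4⟩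
        rw [hm2]
        have hins : (d.insert g t).values = d.values ++ [t] := by
          simp only [PySem.Dict.values, PySem.Dict.items_insert_of_not_contains d t hdc]
          simp
        rw [hins, List.append_assoc]
        simp [List.replicate_succ]

theorem pv_values_foldB (L : List (Int × String)) :
    ∀ (d : PySem.Dict String Int), d.keys.Nodup →
      ∃ extra : List Int, (L.foldl pvStepB d).values = d.values ++ extra ∧
        (∀ v ∈ extra, ∃ p ∈ L, v = p.1) ∧ (L.foldl pvStepB d).keys.Nodup := by
  induction L with
  | nil => intro d hnd; exact ⟨[], by simp, by simp, hnd⟩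
  | cons p L' ih =>
    intro d hnd
    obtain ⟨m, _, hvals, _, hnd'⟩ := pv_trip_lemma p.1 (pvSegs p.2) d d 0 (fun _ => rfl) hnd
    simp only [List.foldl_cons]
    obtain ⟨extra, hv, hmem, hndF⟩ := ih ((pvSegs p.2).foldl (pvFB p.1) d) hnd'
    refine ⟨List.replicate m p.1 ++ extra, ?_, ?_, ?_⟩
    · rw [show pvStepB d p = (pvSegs p.2).foldl (pvFB p.1) d from rfl, hv, hvals,
        List.append_assoc]
    · intro v hv'
      rcases List.mem_append.mp hv' with h | h
      · exact ⟨p, by simp, (List.eq_of_mem_replicate h)⟩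
      · obtain ⟨q, hq, hvq⟩ := hmem v h
        exact ⟨q, by simp [hq], hvq⟩
    · rw [show pvStepB d p = (pvSegs p.2).foldl (pvFB p.1) d from rfl]
      exact hndF

theorem pv_main (L : List (Int × String)) :
    ∀ (k d : PySem.Dict String Int) (mt mf : Int),
      (∀ g, k.contains g = d.contains g) → d.keys.Nodup →
      (∀ p ∈ L, ∀ v ∈ d.values, v < p.1) →
      List.Pairwise (fun p q => p.1 < q.1) L →
      (L.foldl pvStepA (k, mt, mf)).2
        = L.foldl (fun st p => pvScan (pvCnt (L.foldl pvStepB d)) st p.1) (mt, mf) := by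
  induction L with
  | nil => intro k d mt mf _ _ _ _; rfl
  | cons p L' ih =>
    obtain ⟨t, s⟩ := p
    intro k d mt mf hkd hnd hvlt hpw
    obtain ⟨hhd, htl⟩ := List.pairwise_cons.mp hpw
    obtain ⟨m, hcount, hvals, hcont, hnd'⟩ := pv_trip_lemma t (pvSegs s) k d 0 hkd hnd
    simp only [List.foldl_cons]
    have hdB : pvStepB d (t, s) = (pvSegs s).foldl (pvFB t) d := rfl
    rw [hdB]
    obtain ⟨extra, hvF, hexmem, _⟩ := pv_values_foldB L' ((pvSegs s).foldl (pvFB t) d) hnd'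
    -- the count of first-seen value t in the final dict is exactly m
    have hcnt : pvCnt (L'.foldl pvStepB ((pvSegs s).foldl (pvFB t) d)) t = (m : Int) := by
      unfold pvCnt
      rw [hvF, hvals, List.count_append, List.count_append]
      have h1 : List.count t d.values = 0 := by
        rw [List.count_eq_zero]
        intro hmem
        exact absurd (hvlt (t, s) (by simp) t hmem) (lt_irrefl t)
      have h2 : List.count t extra = 0 := by
        rw [List.count_eq_zero]
        intro hmem
        obtain ⟨q, hq, hvq⟩ := hexmem t hmem
        exact absurd (hhd q hq) (by rw [← hvq]; exact lt_irrefl t)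
      rw [h1, h2, List.count_replicate_self]
      simp
    have hstepA : pvStepA (k, mt, mf) (t, s)
        = (((pvSegs s).foldl pvFA (k, (0 : Int))).1,
           if (m : Int) > mf then (t, (m : Int)) else (mt, mf)) := by
      simp only [pvStepA, hcount]
      by_cases hbr : (0 : Int) + (m : Int) > mf
      · rw [if_pos hbr, if_pos (by omega)]
        simp
      · rw [if_neg hbr, if_neg (by omega)]
    have hstepScan : pvScan (pvCnt (L'.foldl pvStepB ((pvSegs s).foldl (pvFB t) d))) (mt, mf) t
        = if (m : Int) > mf then (t, (m : Int)) else (mt, mf) := by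
      simp only [pvScan, hcnt]
    rw [hstepA, hstepScan]
    refine ih _ _ _ _ hcont hnd' (fun q hq v hv => ?_) htl
    rw [hvals] at hv
    rcases List.mem_append.mp hv with h | h
    · exact hvlt q (by simp [hq]) v h
    · rw [List.eq_of_mem_replicate h]
      exact hhd q hq

theorem pv_hist (vs : List Int) :
    ∀ (cs : List Int), (∀ v ∈ vs, 0 ≤ v ∧ v < (cs.length : Int)) →
      ∀ t : Int, 0 ≤ t → t < (cs.length : Int) →
        PySem.List.pyGetD
            (vs.foldl (fun cs v => PySem.List.pySetD cs v (PySem.List.pyGetD cs v 0 + 1)) cs) t 0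
          = PySem.List.pyGetD cs t 0 + (vs.count t : Int) := by
  induction vs with
  | nil => intro cs _ t _ _; simp
  | cons v vs ih =>
    intro cs hmem t ht htl
    obtain ⟨hv0, hvl⟩ := hmem v (by simp)
    have hvn : v = ((v.toNat : Nat) : Int) := by omega
    have htn : t = ((t.toNat : Nat) : Int) := by omega
    have hlen : (PySem.List.pySetD cs v (PySem.List.pyGetD cs v 0 + 1)).length = cs.length :=
      PySem.List.length_pySetD cs v _
    simp only [List.foldl_cons]
    rw [ih _ (fun w hw => by rw [hlen]; exact hmem w (by simp [hw])) t ht (by rw [hlen]; exact htl)]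
    have hstep : PySem.List.pyGetD (PySem.List.pySetD cs v (PySem.List.pyGetD cs v 0 + 1)) t 0
        = if t.toNat = v.toNat then PySem.List.pyGetD cs v 0 + 1 else PySem.List.pyGetD cs t 0 := by
      rw [hvn, htn]
      exact PySem.List.pyGetD_pySetD_natCast cs v.toNat t.toNat _ 0 (by omega)
    rw [hstep, List.count_cons]
    rcases eq_or_ne v t with heq | heq
    · subst heq
      rw [if_pos rfl, beq_self_eq_true, if_pos rfl]
      push_cast
      ring
    · rw [if_neg (by omega), beq_eq_false_iff_ne.mpr heq]
      simp

theorem pv_seed_contains (gs : List String) :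
    ∀ (k d : PySem.Dict String Int), (∀ g, k.contains g = d.contains g) →
      ∀ g, (gs.foldl (fun k init => k.insert init 1) k).contains g
          = (gs.foldl (fun d place => d.insert place 0) d).contains g := by
  induction gs with
  | nil => intro k d h g; exact h g
  | cons x xs ih =>
    intro k d h g
    simp only [List.foldl_cons]
    exact ih _ _ (fun g' => by simp [PySem.Dict.contains_insert, h g']) g

theorem pv_seed_values (gs : List String) :
    ∀ (d : PySem.Dict String Int), (∀ v ∈ d.values, v = 0) →
      ∀ v ∈ (gs.foldl (fun d place => d.insert place 0) d).values, v = 0 := by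
  induction gs with
  | nil => intro d h; exact h
  | cons x xs ih =>
    intro d h
    simp only [List.foldl_cons]
    refine ih _ (fun v hv => ?_)
    rcases PySem.Dict.mem_values_insert d x 0 v hv with h0 | h0
    · exact h0
    · exact h v h0

def pvK0 (e0 : String) : PySem.Dict String Int :=
  (pvSegs e0).foldl (fun k init => k.insert init 1) PySem.Dict.empty

def pvD0 (e0 : String) : PySem.Dict String Int :=
  (pvSegs e0).foldl (fun d place => d.insert place 0) PySem.Dict.empty

def pvDF (e0 : String) (rest : List String) : PySem.Dict String Int :=
  (PySem.List.enumerate rest 1).foldl pvStepB (pvD0 e0)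

def pvCounts (e0 : String) (rest : List String) : List Int :=
  (pvDF e0 rest).values.foldl
    (fun cs v => PySem.List.pySetD cs v (PySem.List.pyGetD cs v 0 + 1))
    (List.replicate (e0 :: rest).length (0 : Int))

theorem pv_d0_nodup (e0 : String) : (pvD0 e0).keys.Nodup :=
  PySem.Dict.nodup_keys_foldl_insert (pvSegs e0) (fun _ _ => (0 : Int)) PySem.Dict.empty
    (by simp [PySem.Dict.empty, PySem.Dict.keys])

theorem pv_d0_values (e0 : String) : ∀ v ∈ (pvD0 e0).values, v = 0 :=
  pv_seed_values (pvSegs e0) PySem.Dict.empty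
    (by intro v hv; simp [PySem.Dict.empty, PySem.Dict.values] at hv)

theorem pv_dF_range (e0 : String) (rest : List String) :
    ∀ v ∈ (pvDF e0 rest).values, 0 ≤ v ∧ v < (((e0 :: rest).length : Nat) : Int) := by
  obtain ⟨extra, hvF, hexmem, _⟩ :=
    pv_values_foldB (PySem.List.enumerate rest 1) (pvD0 e0) (pv_d0_nodup e0)
  intro v hv
  rw [show pvDF e0 rest = (PySem.List.enumerate rest 1).foldl pvStepB (pvD0 e0) from rfl,
    hvF] at hv
  rcases List.mem_append.mp hv with h | h
  · rw [pv_d0_values e0 v h]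
    constructor
    · omega
    · simp
  · obtain ⟨p, hp, hvp⟩ := hexmem v h
    obtain ⟨k, hk, hpk⟩ := (PySem.List.mem_enumerate_iff rest 1 p).mp hp
    subst hpk
    simp only [List.length_cons] at *
    constructor
    · omega
    · push_cast
      subst hvp
      simp
      omega

theorem pv_counts_eq (e0 : String) (rest : List String) :
    ∀ t : Int, 0 ≤ t → t < (((e0 :: rest).length : Nat) : Int) →
      PySem.List.pyGetD (pvCounts e0 rest) t 0 = pvCnt (pvDF e0 rest) t := by
  intro t ht htl
  have hrange : ∀ v ∈ (pvDF e0 rest).values,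
      0 ≤ v ∧ v < ((List.replicate (e0 :: rest).length (0 : Int)).length : Int) := by
    simpa using pv_dF_range e0 rest
  have h := pv_hist (pvDF e0 rest).values (List.replicate (e0 :: rest).length (0 : Int))
    hrange t ht (by simpa using htl)
  have hrep : PySem.List.pyGetD (List.replicate (e0 :: rest).length (0 : Int)) t 0 = 0 := by
    rw [PySem.List.pyGetD_eq_getElem _ _ ht (by simpa using htl)]
    simp
  unfold pvCounts
  rw [h, hrep]
  unfold pvCnt
  ring

-- ===== VERDICT (by name: the statement is the Claim_ definition above) =====
theorem adventureCamp_spec : Claim_equal_adventureCamp := by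
  unfold Claim_equal_adventureCamp
  intro expeditions _hdom hpre
  unfold Spec_adventureCamp
  obtain ⟨e0, rest, rfl⟩ : ∃ e0 rest, expeditions = e0 :: rest := by
    cases expeditions with
    | nil => exact absurd rfl hpre
    | cons a l => exact ⟨a, l, rfl⟩
  have hslice : PySem.List.slice (e0 :: rest) (some 1) none = rest := by
    rw [PySem.List.slice_from_one]
    rfl
  -- A's port, rewritten as a fold over the enumerated tail
  have hA0 : adventureCamp (e0 :: rest)
      = ((PySem.List.pyRange 1 (((e0 :: rest).length : Nat) : Int) 1).foldl
          (fun st j => pvStepA st (j, PySem.List.pyGetD (e0 :: rest) j ""))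
          (pvK0 e0, -1, 0)).2.1 := rfl
  have hEnumA : (PySem.List.pyRange 1 (((e0 :: rest).length : Nat) : Int) 1).foldl
        (fun st j => pvStepA st (j, PySem.List.pyGetD (e0 :: rest) j ""))
        (pvK0 e0, (-1 : Int), (0 : Int))
      = (PySem.List.enumerate rest 1).foldl pvStepA (pvK0 e0, -1, 0) :=
    pv_foldA_enum (fun st j x => pvStepA st (j, x)) rest (e0 :: rest) 1
      (pvK0 e0, -1, 0) (by norm_num) rfl
  -- A = B on the scan level, through pv_main
  have hcont0 : ∀ g, (pvK0 e0).contains g = (pvD0 e0).contains g :=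
    pv_seed_contains (pvSegs e0) _ _ (fun _ => rfl)
  have hvlt : ∀ p ∈ PySem.List.enumerate rest 1, ∀ v ∈ (pvD0 e0).values, v < p.1 := by
    intro p hp v hv
    obtain ⟨k, hk, hpk⟩ := (PySem.List.mem_enumerate_iff rest 1 p).mp hp
    rw [pv_d0_values e0 v hv, hpk]
    simp
    omega
  have hmain := pv_main (PySem.List.enumerate rest 1) (pvK0 e0) (pvD0 e0) (-1) 0
    hcont0 (pv_d0_nodup e0) hvlt (PySem.List.pairwise_lt_enumerate rest 1)
  -- B's scan over the range, as the same scan of the same counts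
  have hn : (1 : Int) + (rest.length : Int) = (((e0 :: rest).length : Nat) : Int) := by
    simp
    omega
  have hscan : (PySem.List.enumerate rest 1).foldl
        (fun st p => pvScan (pvCnt (pvDF e0 rest)) st p.1) ((-1 : Int), (0 : Int))
      = (PySem.List.pyRange 1 (((e0 :: rest).length : Nat) : Int) 1).foldl
          (pvScan (pvCnt (pvDF e0 rest))) (-1, 0) := by
    rw [← hn, ← PySem.List.map_fst_enumerate rest 1, List.foldl_map]
  have hcongr : (PySem.List.pyRange 1 (((e0 :: rest).length : Nat) : Int) 1).foldl
        (pvScan (pvCnt (pvDF e0 rest))) ((-1 : Int), (0 : Int))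
      = (PySem.List.pyRange 1 (((e0 :: rest).length : Nat) : Int) 1).foldl
          (fun (st : Int × Int) t =>
            if PySem.List.pyGetD (pvCounts e0 rest) t 0 > st.2
            then (t, PySem.List.pyGetD (pvCounts e0 rest) t 0) else st) (-1, 0) := by
    refine pv_foldl_congr _ _ _ _ (fun acc t htmem => ?_)
    obtain ⟨h1, h2⟩ := (PySem.List.mem_pyRange_one).mp htmem
    rw [pv_counts_eq e0 rest t (by omega) h2]
    rfl
  have hB0 : adventureCamp_alt (e0 :: rest)
      = ((PySem.List.pyRange 1 (((e0 :: rest).length : Nat) : Int) 1).foldl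
          (fun (st : Int × Int) t =>
            if PySem.List.pyGetD (pvCounts e0 rest) t 0 > st.2
            then (t, PySem.List.pyGetD (pvCounts e0 rest) t 0) else st) (-1, 0)).1 := by
    simp only [adventureCamp_alt, PySem.List.len_eq, hslice]
    rfl
  rw [hA0, hEnumA, hB0]
  have hdFeq : (PySem.List.enumerate rest 1).foldl pvStepB (pvD0 e0) = pvDF e0 rest := rfl
  rw [show ((PySem.List.enumerate rest 1).foldl pvStepA (pvK0 e0, (-1 : Int), (0 : Int))).2.1
      = (((PySem.List.enumerate rest 1).foldl pvStepA (pvK0 e0, (-1 : Int), (0 : Int))).2).1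
    from rfl, hmain, hdFeq, hscan, hcongr]
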